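-- pv_equiv track=rewrite | github.com/skoolkid/skoolkit | skoolkit/skoolctl.py | get_lengths
-- ===== SOURCE A (Python) =====
-- def get_lengths(stmt_lengths):
--     # Find subsequences of identical statement lengths and abbreviate them,
--     # e.g. '16,16,16,8,8,4' -> '16*3,8*2,4'
--     lengths = []
--     prev = None
--     for length in stmt_lengths:
--         if length == prev:
--             lengths[-1][1] += 1
--         else:
--             lengths.append([length, 1])
--             prev = length
--     length_params = []
--     for length, mult in lengths:
--         if mult == 1:
--             length_params.append(length)
--         else:
--             length_params.append('{0}*{1}'.format(length, mult))
--     return ','.join(length_params)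
-- ===== SOURCE B (Python) =====
-- def get_lengths(stmt_lengths):
--     # Divide and conquer: run-length encode each half recursively and merge the
--     # two run lists, fusing the boundary runs when their values coincide.
--     def merge(left, right):
--         if left and right and left[-1][0] == right[0][0]:
--             return left[:-1] + [(left[-1][0], left[-1][1] + right[0][1])] + right[1:]
--         return left + right
--
--     def runs(xs):
--         n = len(xs)
--         if n == 0:
--             return []
--         if n == 1:
--             return [(xs[0], 1)]
--         return merge(runs(xs[:n // 2]), runs(xs[n // 2:]))
--
--     return ','.join(v if c == 1 else '{0}*{1}'.format(v, c)
--                     for v, c in runs(stmt_lengths))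
-- ===== Notes on version B (the rewrite author's own statement) =====
-- stated objective: alternative
-- what changed: Replaces A's single linear prev/last-element state machine plus a second formatting pass with a divide-and-conquer run-length encoder: the list is split in half, each half is encoded recursively, and the two run lists are merged by fusing the boundary runs when their values match.
import Mathlib
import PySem

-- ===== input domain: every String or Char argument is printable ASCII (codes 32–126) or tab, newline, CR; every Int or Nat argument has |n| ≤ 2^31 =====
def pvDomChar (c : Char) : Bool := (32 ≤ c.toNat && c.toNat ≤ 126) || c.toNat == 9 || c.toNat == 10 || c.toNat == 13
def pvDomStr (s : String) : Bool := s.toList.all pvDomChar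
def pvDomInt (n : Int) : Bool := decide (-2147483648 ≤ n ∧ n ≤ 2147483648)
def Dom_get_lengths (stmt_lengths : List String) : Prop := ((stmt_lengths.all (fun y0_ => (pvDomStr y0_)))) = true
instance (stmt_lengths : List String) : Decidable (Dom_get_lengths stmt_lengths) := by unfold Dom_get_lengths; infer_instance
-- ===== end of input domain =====

-- B replaces A's linear prev/last-element state machine plus second formatting pass with a
-- divide-and-conquer run-length encoder (split in half, recurse, fuse boundary runs); same result, different algorithm.


-- ===== PORT A =====
-- lengths[-1][1] += 1 : increment the multiplicity of the LAST pair (A only reaches it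
-- with a nonempty list, since it requires length == prev ≠ None).
def pvIncLast : List (String × Int) → List (String × Int)
  | [] => []
  | [p] => [(p.1, p.2 + 1)]
  | p :: q :: rest => p :: pvIncLast (q :: rest)

-- the first loop of A: state (lengths, prev)
def pvLoopA : List String → List (String × Int) → Option String → List (String × Int)
  | [], lengths, _ => lengths
  | l :: rest, lengths, prev =>
    if some l == prev then pvLoopA rest (pvIncLast lengths) prev
    else pvLoopA rest (lengths ++ [(l, 1)]) (some l)

-- the second loop of A: format each (length, mult) pair
def pvFmtA (p : String × Int) : String :=
  if p.2 == 1 then p.1 else p.1 ++ "*" ++ PySem.Int.toStr p.2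

def get_lengths (stmt_lengths : List String) : String :=
  PySem.Str.join "," ((pvLoopA stmt_lengths [] none).map pvFmtA)

-- ===== PORT B =====
-- Source B's merge(left, right): fuse the boundary runs when both sides are nonempty
-- and their boundary values coincide, else plain concatenation.
def pvMergeB (l r : List (String × Int)) : List (String × Int) :=
  match l.getLast?, r with
  | some (v, c), (w, d) :: rt =>
    if v == w then l.dropLast ++ (v, c + d) :: rt else l ++ r
  | _, _ => l ++ r

-- Source B's runs(xs): split at n//2, encode each half recursively, merge;
-- xs[:k]/xs[k:] with 0 ≤ k ≤ n are exactly List.take/drop.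
def pvRunsB : List String → List (String × Int)
  | [] => []
  | [x] => [(x, 1)]
  | a :: b :: tl =>
    pvMergeB (pvRunsB ((a :: b :: tl).take ((a :: b :: tl).length / 2)))
      (pvRunsB ((a :: b :: tl).drop ((a :: b :: tl).length / 2)))
termination_by xs => xs.length
decreasing_by
  · simp; omega
  · simp; omega

def get_lengths_alt (stmt_lengths : List String) : String :=
  PySem.Str.join ","
    ((pvRunsB stmt_lengths).map
      (fun p => if p.2 == 1 then p.1 else p.1 ++ "*" ++ PySem.Int.toStr p.2))

-- ===== PRECONDITION & SPEC =====
def Spec_get_lengths (stmt_lengths : List String) (out : String) : Prop := out = get_lengths_alt stmt_lengths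
instance (stmt_lengths : List String) (out : String) : Decidable (Spec_get_lengths stmt_lengths out) := by unfold Spec_get_lengths; infer_instance

-- ===== CLAIM (what is proved, stated in full; the proofs are below) =====
def Claim_equal_get_lengths : Prop := ∀ (stmt_lengths : List String), Dom_get_lengths stmt_lengths → Spec_get_lengths stmt_lengths (get_lengths stmt_lengths)

-- ===== LEMMAS AND PROOFS =====

-- the run-length encoding both programs compute, as a common reference point
def pvRuns : List String → List (String × Int)
  | [] => []
  | v :: tl =>
    (v, 1 + ((tl.takeWhile (fun s => s == v)).length : Int)) ::
      pvRuns (tl.dropWhile (fun s => s == v))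
termination_by l => l.length
decreasing_by simp; exact List.length_dropWhile_le _ _

theorem pvRuns_nil : pvRuns [] = [] := by rw [pvRuns]

theorem pvRuns_cons (v : String) (tl : List String) :
    pvRuns (v :: tl) =
      (v, 1 + ((tl.takeWhile (fun s => s == v)).length : Int)) ::
        pvRuns (tl.dropWhile (fun s => s == v)) := by rw [pvRuns]

theorem pvRuns_ne_nil (v : String) (tl : List String) : pvRuns (v :: tl) ≠ [] := by
  rw [pvRuns_cons]; simp

theorem pvIncLast_append (acc : List (String × Int)) (v : String) (n : Int) :
    pvIncLast (acc ++ [(v, n)]) = acc ++ [(v, n + 1)] := by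
  induction acc with
  | nil => rfl
  | cons a tl ih =>
    cases tl with
    | nil => simp [pvIncLast]
    | cons b tl' => simpa [pvIncLast] using ih

theorem pvLoopA_key (rest : List String) :
    ∀ (acc : List (String × Int)) (v : String) (n : Int),
    pvLoopA rest (acc ++ [(v, n)]) (some v) =
      acc ++ (v, n + ((rest.takeWhile (fun s => s == v)).length : Int)) ::
        pvRuns (rest.dropWhile (fun s => s == v)) := by
  induction rest with
  | nil => intro acc v n; simp [pvLoopA, pvRuns_nil]
  | cons l tl ih =>
    intro acc v n
    by_cases h : l = v
    · subst h
      rw [pvLoopA, if_pos (by simp), pvIncLast_append, ih acc l (n + 1)]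
      simp [List.takeWhile, List.dropWhile]
      ring_nf
    · rw [pvLoopA, if_neg (by simp [h]),
        show acc ++ [(v, n)] ++ [(l, 1)] = (acc ++ [(v, n)]) ++ [(l, 1)] by simp,
        ih (acc ++ [(v, n)]) l 1]
      have hb : (l == v) = false := by simp [h]
      simp [List.takeWhile, List.dropWhile, hb, pvRuns_cons]

theorem pvLoopA_runs (xs : List String) : pvLoopA xs [] none = pvRuns xs := by
  cases xs with
  | nil => simp [pvLoopA, pvRuns_nil]
  | cons x tl =>
    rw [pvLoopA, if_neg (by simp),
      show ([] : List (String × Int)) ++ [(x, 1)] = [] ++ [(x, (1 : Int))] by rfl,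
      pvLoopA_key tl [] x 1]
    simp [pvRuns_cons]

theorem pvMergeB_nil_right (l : List (String × Int)) : pvMergeB l [] = l := by
  cases h : l.getLast? with
  | none => simp [pvMergeB, h]
  | some u => obtain ⟨v, c⟩ := u; simp [pvMergeB, h]

theorem pvMergeB_cons (p : String × Int) (L R : List (String × Int)) (hL : L ≠ []) :
    pvMergeB (p :: L) R = p :: pvMergeB L R := by
  cases L with
  | nil => exact absurd rfl hL
  | cons q t =>
    cases hq : (q :: t).getLast? with
    | none => simp at hq
    | some u =>
      cases R with
      | nil => simp [pvMergeB, List.getLast?_cons_cons, hq]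
      | cons r rt =>
        obtain ⟨w, d⟩ := r
        obtain ⟨v, c⟩ := u
        simp only [pvMergeB, List.getLast?_cons_cons, hq]
        split_ifs <;> simp

theorem pvRuns_append (xs ys : List String) :
    pvRuns (xs ++ ys) = pvMergeB (pvRuns xs) (pvRuns ys) := by
  induction hm : xs.length using Nat.strong_induction_on generalizing xs with
  | _ m ih =>
    cases xs with
    | nil => simp [pvRuns_nil, pvMergeB]
    | cons v tl =>
      by_cases hd : tl.dropWhile (fun s => s == v) = []
      · -- the whole tail belongs to the first run
        have ht : tl.takeWhile (fun s => s == v) = tl := by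
          have := List.takeWhile_append_dropWhile (p := fun s => s == v) (l := tl)
          rw [hd] at this; simpa using this
        cases ys with
        | nil =>
          rw [List.append_nil, pvRuns_nil, pvMergeB_nil_right]
        | cons w yt =>
          rw [show (v :: tl) ++ (w :: yt) = v :: (tl ++ w :: yt) by rfl, pvRuns_cons]
          have htw : (tl ++ w :: yt).takeWhile (fun s => s == v)
              = tl ++ (w :: yt).takeWhile (fun s => s == v) := by
            rw [List.takeWhile_append, if_pos (by rw [ht])]
          have hdw : (tl ++ w :: yt).dropWhile (fun s => s == v)
              = (w :: yt).dropWhile (fun s => s == v) := by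
            rw [List.dropWhile_append]
            simp [hd]
          rw [htw, hdw]
          by_cases hvw : w = v
          · subst hvw
            rw [pvRuns_cons w tl, ht, hd, pvRuns_nil, pvRuns_cons w yt]
            simp only [pvMergeB, List.getLast?_singleton]
            rw [if_pos (by simp)]
            rw [show ([(w, 1 + (tl.length : Int))]).dropLast = ([] : List (String × Int))
              from rfl, List.nil_append]
            simp only [List.takeWhile_cons, beq_self_eq_true, if_true,
              List.dropWhile_cons, List.cons.injEq, Prod.mk.injEq,
              List.length_append, List.length_cons, and_true, true_and]
            push_cast; ring
          · have hb : (w == v) = false := by simp [hvw]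
            rw [pvRuns_cons v tl, ht, hd, pvRuns_nil, pvRuns_cons w yt]
            simp only [pvMergeB, List.getLast?_singleton]
            rw [if_neg (by simp; exact fun h => hvw h.symm)]
            simp [hb, pvRuns_cons]
      · -- the first run ends inside tl
        set t := tl.takeWhile (fun s => s == v) with htdef
        set d := tl.dropWhile (fun s => s == v) with hddef
        have hsum := congrArg List.length
          (List.takeWhile_append_dropWhile (p := fun s => s == v) (l := tl))
        simp only [List.length_append] at hsum
        have hdpos : 0 < d.length := by
          cases hdd : d with
          | nil => exact absurd hdd hd
          | cons _ _ => simp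
        have hne : ¬ (tl.takeWhile (fun s => s == v)).length = tl.length := by
          rw [hddef] at hdpos
          omega
        have htw : (tl ++ ys).takeWhile (fun s => s == v) = t := by
          rw [List.takeWhile_append, if_neg hne]
        have hdw : (tl ++ ys).dropWhile (fun s => s == v) = d ++ ys := by
          cases hdd : d with
          | nil => exact absurd hdd hd
          | cons e et =>
            rw [List.dropWhile_append, ← hddef, hdd]
            simp
        have hm' : tl.length + 1 = m := by simpa using hm
        have hdlen : d.length < m := by
          have h1 : d.length ≤ tl.length := by
            rw [hddef]; exact List.length_dropWhile_le _ _
          omega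
        rw [show (v :: tl) ++ ys = v :: (tl ++ ys) by rfl, pvRuns_cons, htw, hdw,
          ih d.length hdlen d rfl, pvRuns_cons v tl, ← htdef, ← hddef]
        obtain ⟨a, td⟩ := List.exists_cons_of_ne_nil hd
        obtain ⟨tl', htl'⟩ := td
        rw [pvMergeB_cons _ _ _ (by rw [htl']; exact pvRuns_ne_nil a tl')]

theorem pvRunsB_eq (xs : List String) : pvRunsB xs = pvRuns xs := by
  induction hm : xs.length using Nat.strong_induction_on generalizing xs with
  | _ m ih =>
    match xs with
    | [] => rw [pvRunsB, pvRuns_nil]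
    | [x] => rw [pvRunsB, pvRuns_cons]; simp [pvRuns_nil]
    | a :: b :: tl =>
      have hm' : tl.length + 2 = m := by simpa using hm
      have hk1 : ((a :: b :: tl).take ((a :: b :: tl).length / 2)).length < m := by
        simp; omega
      have hk2 : ((a :: b :: tl).drop ((a :: b :: tl).length / 2)).length < m := by
        simp; omega
      rw [pvRunsB, ih _ hk1 _ rfl, ih _ hk2 _ rfl, ← pvRuns_append,
        List.take_append_drop]

theorem get_lengths_eq (xs : List String) : get_lengths xs = get_lengths_alt xs := by
  rw [get_lengths, get_lengths_alt, pvLoopA_runs, pvRunsB_eq]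
  rfl

-- ===== VERDICT (by name: the statement is the Claim_ definition above) =====
theorem get_lengths_spec : Claim_equal_get_lengths := by
  intro xs _
  unfold Spec_get_lengths
  exact get_lengths_eq xs
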